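-- pv_equiv track=rewrite | github.com/thorbert-anson-shi/Dasar-Dasar-Pemrograman-1 | TP 3/tp3.py | select_cols
-- ===== SOURCE A (Python) =====
-- def to_list(dataframe: tuple) -> list:
--     return dataframe[0]
--
-- def get_column_names(dataframe: tuple) -> list:
--     return dataframe[1]
--
-- def get_column_types(dataframe: tuple) -> list:
--     return dataframe[2]
--
-- def select_cols(dataframe: tuple, selected_cols: list) -> tuple:
--     """
--     Mengembalikan dataframe baru dimana kolom-kolom sudah
--     dipilih hanya yang terdapat pada 'selected_cols' saja.
--
--     contoh:
--     select_cols(dataframe, ["umur", "nama"]) akan mengembalikan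
--     dataframe baru yang hanya terdiri dari kolom "umur" dan "nama".
--
--     Exceptions:
--       1. jika ada nama kolom pada selected_cols yang tidak
--          ditemukan,
--
--            raise Exception(f"Kolom {selected_col} tidak ditemukan.")
--
--       2. jika select_cols adalah list kosong [],
--
--            raise Exception("Parameter selected_cols tidak boleh kosong.")
--
--     parameter:
--     dataframe (list, list, list): sebuah dataframe
--     selected_cols (list): list of strings, atau list yang berisi
--                           daftar nama kolom
--
--     return (list, list, list): dataframe baru hasil selection pada
--                                kolom, yaitu hanya mengandung kolom-
--                                kolom pada selected_cols saja.
--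
--     """
--     if selected_cols == []:
--         raise Exception(f"Parameter selected_cols tidak boleh kosong.")
--
--     data = to_list(dataframe)
--     col_names = get_column_names(dataframe)
--     col_types = get_column_types(dataframe)
--
--     # Store indices of target columns and their types
--     target_col_idx = []
--     target_col_types = []
--
--     filtered_data = []
--
--     # Find indices of selected col names
--     for col in selected_cols:
--         try:
--             target_idx = col_names.index(col)
--         except ValueError:
--             raise Exception(f"Kolom {col} tidak ditemukan.")
--
--         target_col_idx.append(target_idx)
--
--     # Column names indices correspond to the data type list
--     for col_idx in target_col_idx:
--         target_col_types.append(col_types[col_idx])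
--
--     # Fetch the desired columns from each row of data
--     for row_idx in range(len(data)):
--         temp = []
--         for col_idx in target_col_idx:
--             temp.append(data[row_idx][col_idx])
--         filtered_data.append(temp)
--
--     return filtered_data, selected_cols, target_col_types
-- ===== SOURCE B (Python) =====
-- def select_cols(dataframe: tuple, selected_cols: list) -> tuple:
--     if selected_cols == []:
--         raise Exception("Parameter selected_cols tidak boleh kosong.")
--
--     data, col_names, col_types = dataframe
--
--     # Build the projection column-major: one validated column at a time.
--     types = []
--     columns = []
--     for col in selected_cols:
--         try:
--             idx = col_names.index(col)
--         except ValueError: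
--             raise Exception(f"Kolom {col} tidak ditemukan.")
--         types.append(col_types[idx])
--         columns.append([row[idx] for row in data])
--
--     # Transpose the selected columns back into rows.
--     filtered = [list(r) for r in zip(*columns)]
--     return filtered, selected_cols, types
-- ===== Notes on version B (the rewrite author's own statement) =====
-- stated objective: alternative
-- what changed: B builds the projection column-major (one full validated column per selected name in a single loop) and then transposes with zip(*columns), instead of A's three separate passes and row-major nested loop.
import Mathlib
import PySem

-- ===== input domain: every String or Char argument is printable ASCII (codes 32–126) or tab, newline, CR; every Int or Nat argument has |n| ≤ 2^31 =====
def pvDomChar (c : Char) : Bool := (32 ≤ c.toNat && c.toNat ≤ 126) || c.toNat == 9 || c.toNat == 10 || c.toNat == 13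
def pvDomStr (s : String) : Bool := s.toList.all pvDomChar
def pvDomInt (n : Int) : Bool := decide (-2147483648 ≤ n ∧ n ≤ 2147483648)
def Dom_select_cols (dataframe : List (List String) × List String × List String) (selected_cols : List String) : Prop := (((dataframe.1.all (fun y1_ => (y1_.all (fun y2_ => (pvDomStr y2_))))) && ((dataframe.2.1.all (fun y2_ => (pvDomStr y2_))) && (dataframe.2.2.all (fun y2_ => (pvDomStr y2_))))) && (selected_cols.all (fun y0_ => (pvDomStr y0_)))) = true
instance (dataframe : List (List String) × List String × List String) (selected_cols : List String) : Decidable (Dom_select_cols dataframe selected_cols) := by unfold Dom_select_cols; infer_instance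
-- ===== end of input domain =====

-- B builds the projection column-major (one validated column per selected name) and transposes with zip(*columns); A does three passes plus a row-major nested loop. Equivalence of the returned value is proved on Pre_ (the inputs where A raises no exception).

-- ===== PORT A =====
-- literal port of A; on the explicit-raise paths (excluded by Pre_) it returns ([], [], [])
def select_cols (dataframe : List (List String) × List String × List String) (selected_cols : List String) : List (List String) × List String × List String :=
  if selected_cols = [] then ([], [], [])  -- raise "Parameter selected_cols tidak boleh kosong."
  else
    let data := dataframe.1
    let col_names := dataframe.2.1
    let col_types := dataframe.2.2
    -- first loop: collect indices, raising on the first name not found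
    match selected_cols.mapM (fun col => PySem.List.index? col_names col) with
    | none => ([], [], [])  -- raise f"Kolom {col} tidak ditemukan."
    | some target_col_idx =>
      -- second loop: types by index (IndexError excluded by Pre_)
      let target_col_types := target_col_idx.foldl
        (fun acc i => acc ++ [(PySem.List.pyGet? col_types (Int.ofNat i)).getD ""]) []
      -- third loop: row-major nested loop over the data
      let filtered_data := data.foldl
        (fun acc row => acc ++ [target_col_idx.foldl
          (fun temp i => temp ++ [(PySem.List.pyGet? row (Int.ofNat i)).getD ""]) []]) []
      (filtered_data, selected_cols, target_col_types)

-- ===== PORT B =====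
-- heads-and-tails step of Python's zip(*columns)
def pvHeadsTails : List (List String) → Option (List String × List (List String))
  | [] => some ([], [])
  | [] :: _ => none
  | (a :: as) :: rest => (pvHeadsTails rest).map (fun p => (a :: p.1, as :: p.2))

-- zip(*(c :: rest)) driven structurally by the first column
def pvZipGo : List String → List (List String) → List (List String)
  | [], _ => []
  | a :: as, rest =>
    match pvHeadsTails rest with
    | none => []
    | some (hs, ts) => (a :: hs) :: pvZipGo as ts

-- transpose = [list(r) for r in zip(*columns)]
def pvZipT : List (List String) → List (List String)
  | [] => []
  | c :: rest => pvZipGo c rest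

def select_cols_alt (dataframe : List (List String) × List String × List String) (selected_cols : List String) : List (List String) × List String × List String :=
  if selected_cols = [] then ([], [], [])  -- raise "Parameter selected_cols tidak boleh kosong."
  else
    let data := dataframe.1
    let col_names := dataframe.2.1
    let col_types := dataframe.2.2
    -- single loop: validate the name, take its type and its whole column
    match selected_cols.mapM (fun col =>
        (PySem.List.index? col_names col).map (fun idx =>
          ((PySem.List.pyGet? col_types (Int.ofNat idx)).getD "",
           data.map (fun row => (PySem.List.pyGet? row (Int.ofNat idx)).getD "")))) with
    | none => ([], [], [])  -- raise f"Kolom {col} tidak ditemukan."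
    | some pairs =>
      let types := pairs.map Prod.fst
      let columns := pairs.map Prod.snd
      (pvZipT columns, selected_cols, types)

-- ===== PRECONDITION & SPEC =====
-- Pre_ excludes exactly the inputs where A raises: empty selected_cols, a selected name
-- missing from the column names, or a matched index out of range of col_types or of some row.
def Pre_select_cols (dataframe : List (List String) × List String × List String) (selected_cols : List String) : Prop :=
  selected_cols ≠ [] ∧ ∀ col ∈ selected_cols, col ∈ dataframe.2.1 ∧
    ((PySem.List.index? dataframe.2.1 col).getD 0 < dataframe.2.2.length ∧
     ∀ row ∈ dataframe.1, (PySem.List.index? dataframe.2.1 col).getD 0 < row.length)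
instance (dataframe : List (List String) × List String × List String) (selected_cols : List String) : Decidable (Pre_select_cols dataframe selected_cols) := by unfold Pre_select_cols; infer_instance

def pvWitness_select_cols : (List (List String) × List String × List String) × List String :=
  (([["1", "a"], ["2", "b"]], ["umur", "nama"], ["int", "str"]), ["nama", "umur"])

def Spec_select_cols (dataframe : List (List String) × List String × List String) (selected_cols : List String) (out : List (List String) × List String × List String) : Prop := out = select_cols_alt dataframe selected_cols
instance (dataframe : List (List String) × List String × List String) (selected_cols : List String) (out : List (List String) × List String × List String) : Decidable (Spec_select_cols dataframe selected_cols out) := by unfold Spec_select_cols; infer_instance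

-- ===== CLAIM (what is proved, stated in full; the proofs are below) =====
def Claim_equal_select_cols : Prop := ∀ (dataframe : List (List String) × List String × List String) (selected_cols : List String), Dom_select_cols dataframe selected_cols → Pre_select_cols dataframe selected_cols → Spec_select_cols dataframe selected_cols (select_cols dataframe selected_cols)

-- ===== LEMMAS AND PROOFS =====

-- mapM over Option when every element succeeds
theorem mapM_eq_some_map {α β : Type} (f : α → Option β) (d : β) (l : List α)
    (h : ∀ x ∈ l, (f x).isSome) : l.mapM f = some (l.map (fun x => (f x).getD d)) := by
  induction l with
  | nil => rfl
  | cons a t ih =>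
    have ha := h a (by simp)
    obtain ⟨b, hb⟩ := Option.isSome_iff_exists.mp ha
    simp [List.mapM_cons, hb, ih (fun x hx => h x (by simp [hx]))]

theorem pvHeadsTails_map {α : Type} (t : α → List String) (g : α → String) (l : List α) :
    pvHeadsTails (l.map (fun i => g i :: t i)) = some (l.map g, l.map t) := by
  induction l with
  | nil => rfl
  | cons a rest ih => simp [pvHeadsTails, ih]

theorem pvZipGo_map {α : Type} (a : α) (rest : List α) (g : α → List String → String)
    (data : List (List String)) :
    pvZipGo (data.map (fun row => g a row)) (rest.map (fun i => data.map (fun row => g i row)))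
      = data.map (fun row => (a :: rest).map (fun i => g i row)) := by
  induction data with
  | nil => rfl
  | cons row drest ih =>
    simp only [List.map_cons]
    rw [pvZipGo, pvHeadsTails_map (fun i => drest.map (fun r => g i r)) (fun i => g i row) rest]
    simp [ih]

-- the transpose of column-major-built data is the row-major projection
theorem pvZipT_map_map {α : Type} (l : List α) (hl : l ≠ []) (g : α → List String → String)
    (data : List (List String)) :
    pvZipT (l.map (fun i => data.map (fun row => g i row)))
      = data.map (fun row => l.map (fun i => g i row)) := by
  match l, hl with
  | a :: rest, _ =>
    simp only [List.map_cons]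
    rw [pvZipT]
    exact pvZipGo_map a rest g data

-- foldl-append is map
theorem foldl_append_map {α β : Type} (f : α → β) (l : List α) (init : List β) :
    l.foldl (fun acc x => acc ++ [f x]) init = init ++ l.map f := by
  induction l generalizing init with
  | nil => simp
  | cons a t ih => simp [ih]

-- ===== VERDICT (by name: the statement is the Claim_ definition above) =====
theorem select_cols_spec : Claim_equal_select_cols := by
  intro df sel _ hpre
  obtain ⟨hne, hall⟩ := hpre
  unfold Spec_select_cols select_cols select_cols_alt
  simp only [if_neg hne]
  have hidx : ∀ col ∈ sel, (PySem.List.index? df.2.1 col).isSome := by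
    intro col hc
    exact (PySem.List.index?_isSome_iff _ _).mpr (hall col hc).1
  rw [mapM_eq_some_map _ 0 sel hidx,
      mapM_eq_some_map _ ("", []) sel (by
        intro col hc
        simp only [Option.isSome_map]
        exact hidx col hc)]
  have hpairs : sel.map (fun col =>
      ((PySem.List.index? df.2.1 col).map (fun idx =>
        ((PySem.List.pyGet? df.2.2 (Int.ofNat idx)).getD "",
         df.1.map (fun row => (PySem.List.pyGet? row (Int.ofNat idx)).getD "")))).getD ("", []))
      = sel.map (fun col =>
        ((PySem.List.pyGet? df.2.2 (Int.ofNat ((PySem.List.index? df.2.1 col).getD 0))).getD "",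
         df.1.map (fun row => (PySem.List.pyGet? row (Int.ofNat ((PySem.List.index? df.2.1 col).getD 0))).getD ""))) := by
    refine List.map_congr_left (fun col hc => ?_)
    obtain ⟨i, hi⟩ := Option.isSome_iff_exists.mp (hidx col hc)
    rw [PySem.List.index?_eq_idxOf?] at hi
    simp [hi]
  simp only [hpairs, List.map_map, Function.comp_def]
  refine Prod.ext ?_ (Prod.ext rfl ?_)
  · -- filtered data equals the transpose of the columns
    show df.1.foldl _ [] = pvZipT _
    rw [pvZipT_map_map sel hne
      (fun col row => (PySem.List.pyGet? row (Int.ofNat ((PySem.List.index? df.2.1 col).getD 0))).getD "") df.1,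
      foldl_append_map]
    simp only [List.nil_append]
    refine List.map_congr_left (fun row _ => ?_)
    rw [foldl_append_map, List.map_map]
    simp [Function.comp_def]
  · -- types coincide
    show (sel.map (fun col => (PySem.List.index? df.2.1 col).getD 0)).foldl _ [] = _
    rw [foldl_append_map, List.map_map]
    simp [Function.comp_def]
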